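-- pv_equiv track=rewrite | github.com/Monsieur6/Le-M-Multi-Tool | Main.py | build_boxes
-- ===== SOURCE A (Python) =====
-- def build_boxes(categories, box_width, box_height):
--     boxes = []
--     inner_w = max(2, box_width - 2)
--     for title, items in categories:
--         lines = [title.center(inner_w), '─' * inner_w]
--         for it in items: lines.append(it.ljust(inner_w))
--         while len(lines) < box_height: lines.append(' ' * inner_w)
--         boxes.append(lines)
--     return boxes
-- ===== SOURCE B (Python) =====
-- def build_boxes(categories, box_width, box_height):
--     inner_w = max(2, box_width - 2)
--
--     def row(title, items, r):
--         if r == 0: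
--             return title.center(inner_w)
--         if r == 1:
--             return '\u2500' * inner_w
--         if r - 2 < len(items):
--             return items[r - 2].ljust(inner_w)
--         return ' ' * inner_w
--
--     return [[row(t, its, r) for r in range(max(2 + len(its), box_height))]
--             for t, its in categories]
-- ===== Notes on version B (the rewrite author's own statement) =====
-- stated objective: alternative
-- what changed: B generates each box row-by-row from a single index function r -> line over range(max(2+len(items), box_height)), computing each line from its row index, instead of A's segment construction by mutating appends plus a while-padding loop.
import Mathlib
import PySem

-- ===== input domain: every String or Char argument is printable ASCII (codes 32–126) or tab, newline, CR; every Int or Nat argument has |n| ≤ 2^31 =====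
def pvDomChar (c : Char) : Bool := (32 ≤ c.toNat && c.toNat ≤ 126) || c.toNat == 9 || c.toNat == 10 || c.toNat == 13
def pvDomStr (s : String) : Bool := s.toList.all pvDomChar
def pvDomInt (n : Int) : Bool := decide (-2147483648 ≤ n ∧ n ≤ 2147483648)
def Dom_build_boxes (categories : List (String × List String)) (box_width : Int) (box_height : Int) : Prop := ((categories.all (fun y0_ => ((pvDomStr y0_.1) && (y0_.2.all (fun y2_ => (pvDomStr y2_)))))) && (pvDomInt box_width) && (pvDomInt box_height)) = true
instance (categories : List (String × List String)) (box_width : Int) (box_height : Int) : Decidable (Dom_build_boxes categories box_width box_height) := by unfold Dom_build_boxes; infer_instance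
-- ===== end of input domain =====

-- B builds each box by ROW INDEX: a row function r ↦ line and one comprehension over
-- range(max(2+len(items), box_height)), instead of A's segment appends plus while-padding
-- (objective: alternative decomposition). Shared string helpers are exact ports of
-- CPython's str.center / str.ljust on any input.

-- exact port of Python s.ljust(w): pad with spaces on the right (no-op when len(s) ≥ w)
def pyLjust (s : String) (w : Nat) : String :=
  s ++ String.ofList (List.replicate (w - s.toList.length) ' ')

-- exact port of CPython s.center(w): marg = w - len; left = marg // 2 + (marg & w & 1)
def pyCenter (s : String) (w : Nat) : String :=
  let l := s.toList.length
  if w ≤ l then s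
  else
    let marg := w - l
    let left := marg / 2 + (marg &&& w &&& 1)
    String.ofList (List.replicate left ' ') ++ s ++ String.ofList (List.replicate (marg - left) ' ')

-- ===== PORT A =====
-- the 'while len(lines) < box_height: lines.append(' '*inner_w)' loop
def padWhile (h : Int) (filler : String) (lines : List String) : List String :=
  if (lines.length : Int) < h then padWhile h filler (lines ++ [filler]) else lines
  termination_by (h - lines.length).toNat
  decreasing_by simp_all; omega

def build_boxes (categories : List (String × List String)) (box_width : Int) (box_height : Int) : List (List String) :=
  let inner_w : Nat := (max 2 (box_width - 2)).toNat
  categories.foldl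
    (fun boxes cat =>
      let lines := [pyCenter cat.1 inner_w, String.ofList (List.replicate inner_w '─')]
      let lines := cat.2.foldl (fun ls it => ls ++ [pyLjust it inner_w]) lines
      let lines := padWhile box_height (String.ofList (List.replicate inner_w ' ')) lines
      boxes ++ [lines])
    []

-- ===== PORT B =====
-- B's inner 'row' function: picks the line of a box from its row index
-- (the items[r-2] index is guarded by 'r - 2 < len(items)', so pyGetD's default is never used)
def rowB (inner_w : Nat) (title : String) (items : List String) (r : Int) : String :=
  if r == 0 then pyCenter title inner_w
  else if r == 1 then String.ofList (List.replicate inner_w '─')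
  else if r - 2 < (items.length : Int) then pyLjust (PySem.List.pyGetD items (r - 2) "") inner_w
  else String.ofList (List.replicate inner_w ' ')

def build_boxes_alt (categories : List (String × List String)) (box_width : Int) (box_height : Int) : List (List String) :=
  let inner_w : Nat := (max 2 (box_width - 2)).toNat
  categories.map
    (fun cat =>
      (PySem.List.pyRange 0 (max (2 + (cat.2.length : Int)) box_height) 1).map
        (rowB inner_w cat.1 cat.2))

-- ===== PRECONDITION & SPEC =====
def Spec_build_boxes (categories : List (String × List String)) (box_width : Int) (box_height : Int) (out : List (List String)) : Prop := out = build_boxes_alt categories box_width box_height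
instance (categories : List (String × List String)) (box_width : Int) (box_height : Int) (out : List (List String)) : Decidable (Spec_build_boxes categories box_width box_height out) := by unfold Spec_build_boxes; infer_instance

-- ===== CLAIM =====
def Claim_equal_build_boxes : Prop := ∀ (categories : List (String × List String)) (box_width : Int) (box_height : Int), Dom_build_boxes categories box_width box_height → Spec_build_boxes categories box_width box_height (build_boxes categories box_width box_height)

-- ===== LEMMAS AND PROOFS =====

-- the while loop appends exactly (h - len).toNat copies of the filler
theorem padWhile_eq (h : Int) (f : String) :
    ∀ n (lines : List String), (h - lines.length).toNat = n →
      padWhile h f lines = lines ++ List.replicate n f := by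
  intro n
  induction n with
  | zero =>
      intro lines hn
      rw [padWhile]
      simp only [List.replicate, List.append_nil]
      have : ¬ ((lines.length : Int) < h) := by omega
      simp [this]
  | succ k ih =>
      intro lines hn
      rw [padWhile]
      have hlt : (lines.length : Int) < h := by omega
      simp only [hlt, if_true]
      have : (h - (lines ++ [f]).length : Int).toNat = k := by simp; omega
      rw [ih _ this]
      simp [List.replicate_succ]

-- the while loop, unconditional form
theorem padWhile_eq' (h : Int) (f : String) (lines : List String) :
    padWhile h f lines = lines ++ List.replicate (h - lines.length).toNat f :=
  padWhile_eq h f _ lines rfl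

-- appending mapped items one by one is an append of the map
theorem foldl_append_map (g : String → String) :
    ∀ (items : List String) (init : List String),
      items.foldl (fun ls it => ls ++ [g it]) init = init ++ items.map g := by
  intro items
  induction items with
  | nil => simp
  | cons x xs ih => intro init; simp [List.foldl, ih]

-- accumulating boxes with foldl-append is a map
theorem foldl_append_singleton (g : String × List String → List String) :
    ∀ (cats : List (String × List String)) (acc : List (List String)),
      cats.foldl (fun boxes cat => boxes ++ [g cat]) acc = acc ++ cats.map g := by
  intro cats
  induction cats with
  | nil => simp
  | cons c cs ih => intro acc; simp [List.foldl, ih]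

-- B's row-indexed box equals A's header ++ items ++ padding shape
theorem box_eq (w : Nat) (t : String) (items : List String) (h : Int) :
    (PySem.List.pyRange 0 (max (2 + (items.length : Int)) h) 1).map (rowB w t items)
      = [pyCenter t w, String.ofList (List.replicate w '─')]
          ++ items.map (fun it => pyLjust it w)
          ++ List.replicate (h - (2 + items.length : Int)).toNat
               (String.ofList (List.replicate w ' ')) := by
  rw [PySem.List.pyRange_one]
  apply List.ext_getElem
  · simp; omega
  · intro k h1 h2
    simp only [List.getElem_map, List.getElem_range, Int.zero_add]
    have hk2 : k < 2 + items.length + (h - (2 + items.length : Int)).toNat := by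
      simp at h2; omega
    unfold rowB
    rcases Nat.lt_or_ge k 2 with hk | hk
    · interval_cases k
      · simp
      · simp
    · have h0 : ¬ ((k : Int) == 0) = true := by simp; omega
      have h1' : ¬ ((k : Int) == 1) = true := by simp; omega
      simp only [h0, h1']
      clear h0 h1'
      rcases Nat.lt_or_ge (k - 2) items.length with hkl | hkl
      · have hlt : ((k : Int) - 2 < (items.length : Int)) := by omega
        have hnn : (0 : Int) ≤ (k : Int) - 2 := by omega
        rw [if_pos hlt]
        have hkk : ((k : Int) - 2).toNat = k - 2 := by omega
        rw [List.getElem_append_left (by simp; omega),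
            List.getElem_append_right (by simp; omega)]
        rw [PySem.List.pyGetD_eq_getElem _ _ hnn (by omega)]
        simp [hkk]
      · have hge : ¬ ((k : Int) - 2 < (items.length : Int)) := by omega
        rw [if_neg hge]
        rw [List.getElem_append_right (by simp; omega)]
        simp

-- ===== VERDICT =====
theorem build_boxes_spec : Claim_equal_build_boxes := by
  intro categories box_width box_height _
  unfold Spec_build_boxes build_boxes build_boxes_alt
  simp only
  rw [foldl_append_singleton]
  simp only [List.nil_append]
  apply List.map_congr_left
  intro cat _
  rw [foldl_append_map]
  rw [padWhile_eq', box_eq]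
  simp only [List.append_assoc]
  congr 3
  simp
  omega
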